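-- pv_equiv track=rewrite | github.com/Vibhorium/PrescriptionPrediction | host_api/lineSegmenter.py | lineSegmenter
-- ===== SOURCE A (Python) =====
-- def lineSegmenter(input_line):
--     first_words = ["Tab", "Cap", "Syp","Tab.","Tabs", "Cap.", "Syp.","Tablet","Tablets" "Capsule","Capsules" "Syrup" ]
--     output=[]
--     curr_line = ""
--     for word in input_line.split(' '):
--         if word in first_words:
--             output.append(curr_line)
--             curr_line=""
--         curr_line += word +" "
--     output.append(curr_line)
--     return output
-- ===== SOURCE B (Python) =====
-- def lineSegmenter(input_line):
--     first_words = ["Tab", "Cap", "Syp","Tab.","Tabs", "Cap.", "Syp.","Tablet","Tablets" "Capsule","Capsules" "Syrup" ]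
--     segs = [""]
--     for word in reversed(input_line.split(' ')):
--         segs[0] = word + " " + segs[0]
--         if word in first_words:
--             segs.insert(0, "")
--     return segs
-- ===== Notes on version B (the rewrite author's own statement) =====
-- stated objective: alternative
-- what changed: A scans the words forward keeping an accumulator string and appending finished segments; B traverses the words in reverse, building the segment list back-to-front by prepending each word to the head segment and opening a fresh empty segment at each keyword.
import Mathlib
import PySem

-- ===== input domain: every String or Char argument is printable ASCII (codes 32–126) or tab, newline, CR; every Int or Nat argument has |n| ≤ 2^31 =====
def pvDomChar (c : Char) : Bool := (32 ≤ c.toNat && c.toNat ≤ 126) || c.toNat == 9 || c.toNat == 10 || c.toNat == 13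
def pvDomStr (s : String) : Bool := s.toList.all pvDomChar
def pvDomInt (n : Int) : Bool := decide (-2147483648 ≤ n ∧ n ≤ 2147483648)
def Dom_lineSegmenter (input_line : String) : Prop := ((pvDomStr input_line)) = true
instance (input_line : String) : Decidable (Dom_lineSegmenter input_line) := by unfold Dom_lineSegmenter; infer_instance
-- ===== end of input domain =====

-- B replaces A's forward accumulator loop by a reversed traversal that builds the result
-- back-to-front, prepending each word to the head segment (objective: alternative
-- decomposition, same cost).

-- the exact keyword list of the Python (including the two missing-comma concatenations)
def pvFirstWords : List String :=
  ["Tab", "Cap", "Syp", "Tab.", "Tabs", "Cap.", "Syp.", "Tablet",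
   "TabletsCapsule", "CapsulesSyrup"]

-- ===== PORT A =====
-- loop body: if word in first_words: output.append(curr_line); curr_line = ""
--            curr_line += word + " "
def pvStepA (st : List String × String) (word : String) : List String × String :=
  let st := if pvFirstWords.contains word then (st.1 ++ [st.2], "") else st
  (st.1, st.2 ++ (word ++ " "))

def lineSegmenter (input_line : String) : List String :=
  let st := ((PySem.Str.split? input_line " ").getD []).foldl pvStepA ([], "")
  st.1 ++ [st.2]

-- ===== PORT B =====
-- segs[0] = word + " " + segs[0]
def pvPrependHead (word : String) : List String → List String
  | [] => []
  | s :: r => (word ++ " " ++ s) :: r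

-- loop body over reversed(words): prepend the word to the head segment;
-- if it is a keyword, open a fresh empty segment in front
def pvStepB (word : String) (segs : List String) : List String :=
  let segs := pvPrependHead word segs
  if pvFirstWords.contains word then "" :: segs else segs

-- the Python iterates over reversed(words) updating segs; that is a foldr over words
def lineSegmenter_alt (input_line : String) : List String :=
  ((PySem.Str.split? input_line " ").getD []).foldr pvStepB [""]

-- ===== PRECONDITION & SPEC =====
def Spec_lineSegmenter (input_line : String) (out : List String) : Prop := out = lineSegmenter_alt input_line
instance (input_line : String) (out : List String) : Decidable (Spec_lineSegmenter input_line out) := by unfold Spec_lineSegmenter; infer_instance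

-- ===== CLAIM (what is proved, stated in full; the proofs are below) =====
def Claim_equal_lineSegmenter : Prop := ∀ (input_line : String), Dom_lineSegmenter input_line → Spec_lineSegmenter input_line (lineSegmenter input_line)

-- ===== LEMMAS AND PROOFS =====

-- generic "modify the first element" combinator, used only in the proof
def pvMapHd (f : String → String) : List String → List String
  | [] => []
  | s :: r => f s :: r

-- loop invariant: the forward accumulator run equals the backward head-prepending run
theorem pv_main (ws : List String) : ∀ (out : List String) (cur : String),
    (ws.foldl pvStepA (out, cur)).1 ++ [(ws.foldl pvStepA (out, cur)).2]
      = out ++ pvMapHd (fun s => cur ++ s) (ws.foldr pvStepB [""]) := by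
  induction ws with
  | nil => intro out cur; simp [pvMapHd]
  | cons w ws ih =>
    intro out cur
    simp only [List.foldl_cons, List.foldr_cons]
    by_cases h : pvFirstWords.contains w = true
    · have h' : w ∈ pvFirstWords := by simpa using h
      simp only [pvStepA, h, if_pos]
      rw [ih]
      cases ws.foldr pvStepB [""] with
      | nil => simp [pvStepB, h', pvPrependHead, pvMapHd]
      | cons a t => simp [pvStepB, h', pvPrependHead, pvMapHd, String.append_assoc]
    · have h' : w ∉ pvFirstWords := by simpa using h
      simp only [pvStepA, h, Bool.false_eq_true, if_false]
      rw [ih]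
      cases ws.foldr pvStepB [""] with
      | nil => simp [pvStepB, h', pvPrependHead, pvMapHd]
      | cons a t => simp [pvStepB, h', pvPrependHead, pvMapHd, String.append_assoc]

-- ===== VERDICT (by name: the statement is the Claim_ definition above) =====
theorem lineSegmenter_spec : Claim_equal_lineSegmenter := by
  intro input_line _
  show lineSegmenter input_line = lineSegmenter_alt input_line
  unfold lineSegmenter lineSegmenter_alt
  rw [pv_main]
  cases ((PySem.Str.split? input_line " ").getD []).foldr pvStepB [""] with
  | nil => simp [pvMapHd]
  | cons a t => simp [pvMapHd]
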